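-- pv_equiv track=rewrite | github.com/hackbio-ca/apa-site-choice-prediction | Akshita-files/revised2.py | scan_pas
-- ===== SOURCE A (Python) =====
-- UPSTREAM   = 50
--
-- PAS_FROM   = 10   # scan -10..-40 upstream of cut
--
-- PAS_TO     = 40
--
-- PAS_VARIANTS = {
--     "AAUAAA", "AUUAAA", "AGUAAA", "AAGAAA", "AACAAA",
--     "AAUAUA", "AAUUAA", "AAUAAG", "UAUAAA", "GAUAAA",
--     "CAUAAA", "ACUAAA", "AAUGAA"
-- }
--
-- def scan_pas(seq: str):
--     cut = UPSTREAM
--     region = (seq or "")[max(0, cut - PAS_TO): max(0, cut - PAS_FROM)]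
--     found = 0; has_canonical = 0
--     for i in range(0, max(0, len(region) - 5)):
--         mer = region[i:i+6]
--         if mer in PAS_VARIANTS:
--             found += 1
--             if mer == "AAUAAA":
--                 has_canonical = 1
--     return {
--         "presence_AAUAAA": has_canonical,
--         "pas_variant_count": found,
--         "presence_any_PAS_variant": int(found > 0)
--     }
-- ===== SOURCE B (Python) =====
-- UPSTREAM   = 50
--
-- PAS_FROM   = 10
--
-- PAS_TO     = 40
--
-- PAS_VARIANTS = {
--     "AAUAAA", "AUUAAA", "AGUAAA", "AAGAAA", "AACAAA",
--     "AAUAUA", "AAUUAA", "AAUAAG", "UAUAAA", "GAUAAA",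
--     "CAUAAA", "ACUAAA", "AAUGAA"
-- }
--
-- def scan_pas(seq: str):
--     cut = UPSTREAM
--     region = (seq or "")[max(0, cut - PAS_TO): max(0, cut - PAS_FROM)]
--     found = 0
--     for v in PAS_VARIANTS:
--         start = 0
--         while True:
--             j = region.find(v, start)
--             if j < 0:
--                 break
--             found += 1
--             start = j + 1
--     return {
--         "presence_AAUAAA": int("AAUAAA" in region),
--         "pas_variant_count": found,
--         "presence_any_PAS_variant": int(found > 0)
--     }
-- ===== Notes on version B (the rewrite author's own statement) =====
-- stated objective: alternative
-- what changed: B loops over the 13 PAS variants and counts each one's overlapping occurrences in the region with a find-loop advancing by 1, instead of A's scan over every region position testing 6-mer set membership; the canonical flag becomes a direct substring test.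
import Mathlib
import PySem

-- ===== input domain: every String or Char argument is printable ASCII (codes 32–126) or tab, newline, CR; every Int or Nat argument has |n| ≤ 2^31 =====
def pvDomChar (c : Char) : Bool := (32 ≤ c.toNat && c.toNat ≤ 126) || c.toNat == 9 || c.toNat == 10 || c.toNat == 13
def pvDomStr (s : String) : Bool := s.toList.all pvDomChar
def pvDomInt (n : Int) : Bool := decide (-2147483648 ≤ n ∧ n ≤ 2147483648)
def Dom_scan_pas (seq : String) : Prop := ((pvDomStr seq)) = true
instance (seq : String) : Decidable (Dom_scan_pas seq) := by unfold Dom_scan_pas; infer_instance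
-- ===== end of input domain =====

-- B loops over the PAS variant table counting overlapping occurrences with find-loops,
-- instead of A's position scan with 6-mer set membership (objective: alternative decomposition).

-- ===== PORT A =====
-- PAS_VARIANTS (a set of 13 distinct 6-mers; insertion order of the literal)
def pasVariants : List (List Char) :=
  ["AAUAAA".toList, "AUUAAA".toList, "AGUAAA".toList, "AAGAAA".toList, "AACAAA".toList,
   "AAUAUA".toList, "AAUUAA".toList, "AAUAAG".toList, "UAUAAA".toList, "GAUAAA".toList,
   "CAUAAA".toList, "ACUAAA".toList, "AAUGAA".toList]

-- region = (seq or "")[max(0, 50-40) : max(0, 50-10)]  (identical line in A and in B)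
def pasRegion (seq : String) : List Char :=
  PySem.List.slice (if seq.toList = [] then [] else seq.toList)
    (some (max 0 (50 - 40))) (some (max 0 (50 - 10)))

def scan_pas (seq : String) : List (String × Int) :=
  let region := pasRegion seq
  let st := (PySem.List.pyRange 0 (max 0 ((region.length : Int) - 5)) 1).foldl
    (fun (st : Int × Int) i =>
      let mer := PySem.List.slice region (some i) (some (i + 6))
      if mer ∈ pasVariants then
        (st.1 + 1, if mer = "AAUAAA".toList then 1 else st.2)
      else st) (0, 0)
  [("presence_AAUAAA", st.2), ("pas_variant_count", st.1),
   ("presence_any_PAS_variant", if st.1 > 0 then (1 : Int) else 0)]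

-- ===== PORT B =====
-- the  while True: j = region.find(v, start); if j < 0: break; found += 1; start = j + 1
-- loop of Source B; the fuel argument (region.length + 1 at the call site) only makes the
-- loop structural — the body is unchanged.
def pvFindCount (region v : List Char) : Nat → Nat → Nat
  | 0, _ => 0
  | fuel + 1, start =>
    let j := PySem.Chars.findFrom region v (start : Int) none
    if j < 0 then 0 else pvFindCount region v fuel (j.toNat + 1) + 1

def scan_pas_alt (seq : String) : List (String × Int) :=
  let region := pasRegion seq
  let found : Int := pasVariants.foldl
    (fun acc v => acc + (pvFindCount region v (region.length + 1) 0 : Int)) 0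
  [("presence_AAUAAA", if PySem.Chars.isIn "AAUAAA".toList region then (1 : Int) else 0),
   ("pas_variant_count", found),
   ("presence_any_PAS_variant", if found > 0 then (1 : Int) else 0)]

-- ===== PRECONDITION & SPEC =====
def Spec_scan_pas (seq : String) (out : List (String × Int)) : Prop := out = scan_pas_alt seq
instance (seq : String) (out : List (String × Int)) : Decidable (Spec_scan_pas seq out) := by unfold Spec_scan_pas; infer_instance

-- ===== CLAIM (what is proved, stated in full; the proofs are below) =====
def Claim_equal_scan_pas : Prop := ∀ (seq : String), Dom_scan_pas seq → Spec_scan_pas seq (scan_pas seq)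

-- ===== LEMMAS AND PROOFS =====

-- a prefix of a suffix is an infix
theorem pv_infix_of_prefix_drop {v l : List Char} {k : Nat} (h : v <+: l.drop k) : v <:+: l := by
  obtain ⟨t, ht⟩ := h
  exact ⟨l.take k, t, by rw [List.append_assoc, ht, List.take_append_drop]⟩

-- the find-loop from start s counts the positions i ≥ s where v occurs (as a prefix of r.drop i)
theorem pvFindCount_spec (r v : List Char) (hv : v ≠ []) :
    ∀ (fuel s : Nat), s ≤ r.length → r.length + 1 - s ≤ fuel →
    pvFindCount r v fuel s
      = (List.range (r.length - s)).countP (fun k => decide (v <+: r.drop (s + k))) := by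
  intro fuel
  induction fuel with
  | zero => intro s hs hf; omega
  | succ fuel ih =>
    intro s hs hf
    by_cases hj : PySem.Chars.findFrom r v (s : Int) none = -1
    · have hnin : ¬ v <:+: r.drop s :=
        (PySem.Chars.findFrom_natCast_eq_neg_one_iff r v s hs).mp hj
      have hz : (List.range (r.length - s)).countP (fun k => decide (v <+: r.drop (s + k))) = 0 := by
        rw [List.countP_eq_zero]
        intro k _
        simp only [decide_eq_true_eq]
        intro hpre
        have hpre' : v <+: (r.drop s).drop k := by
          rw [List.drop_drop]; exact hpre
        exact hnin (pv_infix_of_prefix_drop hpre')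
      rw [hz]
      simp [pvFindCount, hj]
    · obtain ⟨hsle, hpre, hmin⟩ := PySem.Chars.findFrom_natCast_spec r v s hs hj
      set j := PySem.Chars.findFrom r v (s : Int) none with hjdef
      have hj0 : (0 : Int) ≤ j := le_trans (by exact_mod_cast Int.natCast_nonneg s) hsle
      have hsj : s ≤ j.toNat := by omega
      have hjn : j.toNat < r.length := by
        by_contra hge
        push Not at hge
        rw [List.drop_eq_nil_of_le hge, List.prefix_nil] at hpre
        exact hv hpre
      have hstep : pvFindCount r v (fuel + 1) s = pvFindCount r v fuel (j.toNat + 1) + 1 := by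
        simp only [pvFindCount, ← hjdef]
        rw [if_neg (by omega)]
      rw [hstep, ih (j.toNat + 1) (by omega) (by omega)]
      conv_rhs => rw [show r.length - s = ((j.toNat - s) + 1) + (r.length - (j.toNat + 1)) from by omega,
        List.range_add, List.range_succ]
      rw [List.countP_append, List.countP_append, List.countP_map]
      have h1 : (List.range (j.toNat - s)).countP (fun k => decide (v <+: r.drop (s + k))) = 0 := by
        rw [List.countP_eq_zero]
        intro k hk
        simp only [decide_eq_true_eq]
        exact hmin (s + k) (by omega) (by simp at hk; omega)
      have h2 : ([j.toNat - s]).countP (fun k => decide (v <+: r.drop (s + k))) = 1 := by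
        simp only [List.countP_cons, List.countP_nil]
        rw [show s + (j.toNat - s) = j.toNat from by omega]
        simp [hpre]
      have h3 : (List.range (r.length - (j.toNat + 1))).countP
            ((fun k => decide (v <+: r.drop (s + k))) ∘ (fun x => j.toNat - s + 1 + x))
          = (List.range (r.length - (j.toNat + 1))).countP
            (fun k => decide (v <+: r.drop (j.toNat + 1 + k))) := by
        apply List.countP_congr
        intro k _
        simp only [Function.comp]
        rw [show s + (j.toNat - s + 1 + k) = j.toNat + 1 + k from by omega]
      rw [h1, h2, h3]
      omega

theorem pv_window_eq_iff (r v : List Char) (hv : v.length = 6) (k : Nat) :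
    (decide (PySem.List.slice r (some (k : Int)) (some ((k : Int) + 6)) = v))
      = decide (v <+: r.drop k) := by
  have hs : PySem.List.slice r (some (k : Int)) (some ((k : Int) + 6)) = (r.drop k).take 6 := by
    have := PySem.List.slice_natCast_add (xs := r) (j := k) (n := 6)
    simpa using this
  rw [hs]
  simp only [decide_eq_decide]
  rw [List.prefix_iff_eq_take, hv, eq_comm]

theorem pv_no_tail_occ (r v : List Char) (hv : v.length = 6) (k : Nat)
    (hk : r.length - 5 ≤ k) : ¬ v <+: r.drop k := by
  intro h
  have := h.length_le
  simp [List.length_drop] at this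
  omega

theorem pv_count_range (r v : List Char) (hv : v.length = 6) :
    (List.range r.length).countP (fun k => decide (v <+: r.drop k))
      = (List.range (r.length - 5)).countP (fun k => decide (v <+: r.drop k)) := by
  conv_lhs => rw [show r.length = (r.length - 5) + (r.length - (r.length - 5)) from by omega,
      List.range_add]
  rw [List.countP_append]
  have : ((List.range (r.length - (r.length - 5))).map (r.length - 5 + ·)).countP
      (fun k => decide (v <+: r.drop k)) = 0 := by
    rw [List.countP_eq_zero]
    intro a ha
    obtain ⟨b, _, rfl⟩ := List.mem_map.mp ha
    simpa using pv_no_tail_occ r v hv _ (by omega)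
  omega

theorem pv_exists_iff (r v : List Char) (hv : v.length = 6) :
    (∃ j, v <+: r.drop j) ↔ ∃ k ∈ List.range (r.length - 5), v <+: r.drop k := by
  constructor
  · rintro ⟨j, hj⟩
    refine ⟨j, List.mem_range.mpr ?_, hj⟩
    by_contra h
    exact pv_no_tail_occ r v hv j (by omega) hj
  · rintro ⟨k, _, hk⟩; exact ⟨k, hk⟩

theorem pv_countP_or {α : Type} (L : List α) (p q : α → Bool)
    (h : ∀ a ∈ L, ¬(p a = true ∧ q a = true)) :
    L.countP (fun a => p a || q a) = L.countP p + L.countP q := by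
  induction L with
  | nil => simp
  | cons a L ih =>
    have hd := h a (by simp)
    have ht : ∀ b ∈ L, ¬(p b = true ∧ q b = true) := fun b hb => h b (by simp [hb])
    simp only [List.countP_cons, ih ht]
    cases hp : p a <;> cases hq : q a <;> simp_all <;> omega

theorem pv_countP_mem {α : Type} [DecidableEq α] (L : List Nat) (w : Nat → α)
    (V : List α) (hnd : V.Nodup) :
    L.countP (fun k => decide (w k ∈ V))
      = (V.map (fun v => L.countP (fun k => decide (w k = v)))).sum := by
  induction V with
  | nil => simp
  | cons v V ih =>
    have hnd' := (List.nodup_cons.mp hnd)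
    have : (fun k => decide (w k ∈ v :: V)) = fun k => (decide (w k = v) || decide (w k ∈ V)) := by
      funext k; simp [List.mem_cons]
    rw [this, pv_countP_or _ _ _ (fun a _ => by
      simp only [decide_eq_true_eq]
      rintro ⟨h1, h2⟩
      exact hnd'.1 (h1 ▸ h2)), ih hnd'.2]
    simp

theorem pv_foldA (w : Int → List Char) (c : List Char) (V : List (List Char)) :
    ∀ (L : List Int) (f0 h0 : Int),
      L.foldl (fun (st : Int × Int) i =>
          if w i ∈ V then (st.1 + 1, if w i = c then 1 else st.2) else st) (f0, h0)
        = (f0 + (L.countP (fun i => decide (w i ∈ V)) : Int),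
           if L.any (fun i => decide (w i ∈ V) && decide (w i = c)) then 1 else h0) := by
  intro L
  induction L with
  | nil => intro f0 h0; simp
  | cons i L ih =>
    intro f0 h0
    simp only [List.foldl_cons, List.countP_cons, List.any_cons]
    by_cases hm : w i ∈ V
    · have dm : (decide (w i ∈ V)) = true := decide_eq_true hm
      by_cases hc : w i = c
      · have dc : (decide (w i = c)) = true := decide_eq_true hc
        rw [if_pos hm, if_pos hc, ih]
        simp only [dm, dc, Bool.true_and, Bool.true_or, if_true, Prod.mk.injEq]
        refine ⟨by push_cast; ring, ?_⟩
        cases hany : L.any (fun i => decide (w i ∈ V) && decide (w i = c)) <;> simp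
      · have dc : (decide (w i = c)) = false := decide_eq_false hc
        rw [if_pos hm, if_neg hc, ih]
        simp only [dm, dc, Bool.true_and, Bool.false_or, if_true, Prod.mk.injEq]
        exact ⟨by push_cast; ring, trivial⟩
    · have dm : (decide (w i ∈ V)) = false := decide_eq_false hm
      rw [if_neg hm, ih]
      simp only [dm, Bool.false_and, Bool.false_or, Prod.mk.injEq]
      exact ⟨by push_cast; ring, trivial⟩

theorem pv_main (r : List Char) :
    ((PySem.List.pyRange 0 (max 0 ((r.length : Int) - 5)) 1).foldl
        (fun (st : Int × Int) i =>
          let mer := PySem.List.slice r (some i) (some (i + 6))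
          if mer ∈ pasVariants then
            (st.1 + 1, if mer = "AAUAAA".toList then 1 else st.2)
          else st) (0, 0))
      = (pasVariants.foldl (fun acc v => acc + (pvFindCount r v (r.length + 1) 0 : Int)) 0,
         if PySem.Chars.isIn "AAUAAA".toList r then 1 else 0) := by
  have hlen6 : ∀ v ∈ pasVariants, v.length = 6 := by decide
  have hnd : pasVariants.Nodup := by decide
  have hcmem : "AAUAAA".toList ∈ pasVariants := by decide
  have hL : PySem.List.pyRange 0 (max 0 ((r.length : Int) - 5)) 1
      = (List.range (r.length - 5)).map (fun k : Nat => (0 : Int) + k) := by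
    rw [PySem.List.pyRange_one,
      show ((max 0 ((r.length : Int) - 5)) - 0).toNat = r.length - 5 from by omega]
  dsimp only
  rw [pv_foldA (fun i => PySem.List.slice r (some i) (some (i + 6))) "AAUAAA".toList pasVariants]
  rw [hL]
  -- count component
  have hcount : ((List.range (r.length - 5)).map (fun k : Nat => (0 : Int) + k)).countP
        (fun i => decide (PySem.List.slice r (some i) (some (i + 6)) ∈ pasVariants))
      = ((pasVariants.map (fun v => (List.range r.length).countP
          (fun k => decide (v <+: r.drop k))))).sum := by
    rw [List.countP_map]
    refine Eq.trans (b := ((pasVariants.map (fun v => (List.range (r.length - 5)).countP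
        (fun k : Nat => decide (PySem.List.slice r (some (k : Int)) (some ((k : Int) + 6)) = v))))).sum) ?_ ?_
    · refine Eq.trans ?_ (pv_countP_mem (List.range (r.length - 5))
        (fun k : Nat => PySem.List.slice r (some (k : Int)) (some ((k : Int) + 6))) pasVariants hnd)
      apply List.countP_congr
      intro k _
      simp
    · congr 1
      apply List.map_congr_left
      intro v hvmem
      rw [List.countP_congr (fun k _ => by rw [pv_window_eq_iff r v (hlen6 v hvmem) k])]
      exact (pv_count_range r v (hlen6 v hvmem)).symm
  -- B-side found
  have hfound : pasVariants.foldl (fun acc v => acc + (pvFindCount r v (r.length + 1) 0 : Int)) 0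
      = ((pasVariants.map (fun v => (List.range r.length).countP
          (fun k => decide (v <+: r.drop k)))).sum : Nat) := by
    rw [PySem.List.foldl_add]
    rw [Nat.cast_list_sum, List.map_map]
    simp only [zero_add]
    congr 1
    apply List.map_congr_left
    intro v hvmem
    have hv : v ≠ [] := by
      intro h; have := hlen6 v hvmem; rw [h] at this; simp at this
    simp only [Function.comp]
    rw [pvFindCount_spec r v hv (r.length + 1) 0 (by omega) (by omega)]
    simp
  -- hc component
  have hany : (((List.range (r.length - 5)).map (fun k : Nat => (0 : Int) + k)).any
        (fun i => decide (PySem.List.slice r (some i) (some (i + 6)) ∈ pasVariants)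
          && decide (PySem.List.slice r (some i) (some (i + 6)) = "AAUAAA".toList)))
      = PySem.Chars.isIn "AAUAAA".toList r := by
    rw [Bool.eq_iff_iff]
    rw [List.any_eq_true, ← PySem.Chars.exists_prefix_drop_iff_isIn]
    constructor
    · rintro ⟨i, hi, hb⟩
      obtain ⟨k, hk, rfl⟩ := List.mem_map.mp hi
      simp only [zero_add, Bool.and_eq_true, decide_eq_true_eq] at hb
      have hwin := pv_window_eq_iff r ("AAUAAA".toList) (by decide) k
      have hd : decide (PySem.List.slice r (some (k : Int)) (some ((k : Int) + 6))
          = "AAUAAA".toList) = true := decide_eq_true hb.2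
      rw [hwin] at hd
      exact ⟨k, of_decide_eq_true hd⟩
    · rintro ⟨j, hj⟩
      obtain ⟨k, hkmem, hpre⟩ := (pv_exists_iff r ("AAUAAA".toList) (by decide)).mp ⟨j, hj⟩
      refine ⟨(0 : Int) + k, List.mem_map.mpr ⟨k, hkmem, rfl⟩, ?_⟩
      simp only [zero_add]
      have hwin := pv_window_eq_iff r ("AAUAAA".toList) (by decide) k
      have hsc : PySem.List.slice r (some (k : Int)) (some ((k : Int) + 6)) = "AAUAAA".toList :=
        of_decide_eq_true (by rw [hwin]; exact decide_eq_true hpre)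
      rw [hsc]
      decide
  rw [hcount, hfound, hany]
  simp

-- ===== VERDICT (by name: the statement is the Claim_ definition above) =====
theorem scan_pas_spec : Claim_equal_scan_pas := by
  intro seq _
  unfold Spec_scan_pas scan_pas scan_pas_alt
  dsimp only
  rw [pv_main (pasRegion seq)]
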